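-- pv_equiv track=rewrite | github.com/yutao-li/leetcode | Maximal Char Requests.py | getMaxCharCount
-- ===== SOURCE A (Python) =====
-- def getMaxCharCount(s, queries):
--     # queries is a n x 2 array where queries[i][0] and queries[i][1] represents x[i] and y[i] for the ith query.
--     st = [0] * len(s) + [[ch.lower(), 1] for ch in s]
--     for i in range(len(s) - 1, 0, -1):
--         if st[2 * i][0] == st[2 * i + 1][0]:
--             st[i] = [st[2 * i][0], st[2 * i][1] + st[2 * i + 1][1]]
--         else:
--             st[i] = max(st[2 * i], st[2 * i + 1])
--     res = []
--     for i, j in queries: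
--         i += len(s)
--         j += len(s)
--         m = ['a', 0]
--         while i <= j:
--             if i % 2:
--                 if st[i][0] == m[0]:
--                     m[1] += st[i][1]
--                 else:
--                     m = max(m, st[i][:])
--                 i += 1
--             if j % 2 == 0:
--                 if st[j][0] == m[0]:
--                     m[1] += st[j][1]
--                 else:
--                     m = max(m, st[j][:])
--                 j -= 1
--             i //= 2
--             j //= 2
--         res.append(m[1])
--     return res
-- ===== SOURCE B (Python) =====
-- def getMaxCharCount(s, queries):
--     # Direct per-query scan: the answer for [x, y] is the number of occurrences
--     # of the lexicographically largest character of s[x:y+1].lower(); empty range -> 0.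
--     res = []
--     for x, y in queries:
--         if x > y:
--             res.append(0)
--         else:
--             low = s[x:y + 1].lower()
--             res.append(low.count(max(low)))
--     return res
-- ===== Notes on version B (the rewrite author's own statement) =====
-- stated objective: simpler
-- what changed: Replaces the bottom-up segment tree (array build plus iterative bit-walking range queries) by a direct per-query scan: lowercase the slice s[x:y+1], take its maximum character and count its occurrences.
-- intended difference: On queries [x,y] with 0<=x<=y<len(s) whose lowercased characters are all below 'a' (digits, spaces, punctuation), A returns 0 because its accumulator is seeded with the sentinel ['a',0] that outranks every such character, while B returns the actual count of the largest character of the slice, which is the intended answer to a maximal-character query. — e.g. on getMaxCharCount("3", [[0, 0]]): A returns [0], B returns [1]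
-- outside the precondition, e.g. on getMaxCharCount('a', [[0, 2]]): A returns [2], B returns [1]; on getMaxCharCount('ab', [[-1, 1]]): A returns [2], B returns [1]; on getMaxCharCount('abcde', [[1, 7]]): A raises IndexError, B returns [1]
import Mathlib
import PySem

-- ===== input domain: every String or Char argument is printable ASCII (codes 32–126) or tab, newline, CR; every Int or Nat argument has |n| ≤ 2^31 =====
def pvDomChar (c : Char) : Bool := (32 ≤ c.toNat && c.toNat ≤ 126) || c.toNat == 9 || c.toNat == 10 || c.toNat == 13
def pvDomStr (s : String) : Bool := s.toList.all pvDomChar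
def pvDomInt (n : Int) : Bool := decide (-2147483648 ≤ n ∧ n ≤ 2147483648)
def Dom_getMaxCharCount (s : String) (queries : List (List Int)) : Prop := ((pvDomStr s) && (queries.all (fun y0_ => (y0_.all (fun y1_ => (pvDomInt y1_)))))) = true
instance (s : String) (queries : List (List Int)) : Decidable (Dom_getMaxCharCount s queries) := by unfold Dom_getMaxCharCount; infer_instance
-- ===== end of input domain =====

-- B replaces A's segment tree by a direct per-query scan (lowercase the slice, count its
-- maximal character); return-value equivalence outside D_, where B fixes A's 'a'-sentinel.

-- ===== PORT A =====
-- Python's max(u, v) on two [char, count] lists: lexicographic comparison, first on ties.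
def pvPyMax (u v : Char × Int) : Char × Int :=
  if u.1 < v.1 ∨ (u.1 = v.1 ∧ u.2 < v.2) then v else u

-- the query-loop update: 'if st[k][0] == m[0]: m[1] += st[k][1] else: m = max(m, st[k][:])'
def pvStep (m v : Char × Int) : Char × Int :=
  if v.1 = m.1 then (m.1, m.2 + v.2) else pvPyMax m v

-- st = [0]*len(s) + [[ch.lower(), 1] for ch in s]; the first len(s) slots hold Python's
-- int placeholders, which A never reads on Pre_ inputs; modeled by a dummy pair.
def pvInitSt (s : List Char) : List (Char × Int) :=
  List.replicate s.length ('a', 0) ++ s.map (fun ch => (PySem.Chars.lowerChar ch, 1))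

-- loop body of 'for i in range(len(s)-1, 0, -1)'
def pvBuildStep (st : List (Char × Int)) (i : Int) : List (Char × Int) :=
  let a := PySem.List.pyGetD st (2 * i) ('a', 0)
  let b := PySem.List.pyGetD st (2 * i + 1) ('a', 0)
  PySem.List.pySetD st i (if a.1 = b.1 then (a.1, a.2 + b.2) else pvPyMax a b)

def pvBuild (s : List Char) : List (Char × Int) :=
  (PySem.List.pyRange ((s.length : Int) - 1) 0 (-1)).foldl pvBuildStep (pvInitSt s)

-- the 'while i <= j' walk; fuel only makes the recursion structural (it is proved
-- sufficient below: each iteration strictly shrinks j - i + 2)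
def pvQloopF (st : List (Char × Int)) : Nat → Int → Int → (Char × Int) → (Char × Int)
  | 0, _, _, m => m
  | f + 1, i, j, m =>
    if i ≤ j then
      let p := if PySem.Int.mod i 2 = 1 then (pvStep m (PySem.List.pyGetD st i ('a', 0)), i + 1) else (m, i)
      let q := if PySem.Int.mod j 2 = 0 then (pvStep p.1 (PySem.List.pyGetD st j ('a', 0)), j - 1) else (p.1, j)
      pvQloopF st f (PySem.Int.floordiv p.2 2) (PySem.Int.floordiv q.2 2) q.1
    else m

def pvQloop (st : List (Char × Int)) (i j : Int) (m : Char × Int) : Char × Int :=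
  pvQloopF st (j - i + 2).toNat i j m

def getMaxCharCount (s : String) (queries : List (List Int)) : List Int :=
  let n : Int := PySem.Str.len s
  let st := pvBuild s.toList
  queries.foldl
    (fun res q =>
      -- 'for i, j in queries': pair unpacking, encoded totally by a length guard
      -- (a non-pair raises ValueError in Python; such inputs are outside Pre_)
      if q.length == 2 then
        res ++ [(pvQloop st (q.headD 0 + n) (q.getLastD 0 + n) ('a', 0)).2]
      else res ++ [0])
    []

-- ===== PORT B =====
def getMaxCharCount_alt (s : String) (queries : List (List Int)) : List Int :=
  queries.foldl
    (fun res q =>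
      -- 'for x, y in queries': pair unpacking, same total length-guard encoding
      if q.length == 2 then
        let x := q.headD 0
        let y := q.getLastD 0
        res ++ [if x > y then 0
                else
                  let low := PySem.Chars.lower (PySem.List.slice s.toList (some x) (some (y + 1)))
                  match PySem.List.max? low (fun c => c) with
                  | some mx => (low.count mx : Int)
                  | none => 0]   -- empty slice: unreachable when x ≤ y under Pre_
      else res ++ [0])
    []

-- ===== PRECONDITION & SPEC =====
def pvQueryOK (n : Int) (q : List Int) : Bool :=
  q.length == 2 && (decide (q.getD 1 0 < q.getD 0 0) || (decide (0 ≤ q.getD 0 0) && decide (q.getD 1 0 < n)))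

-- Pre_ excludes queries that are not int pairs and queries [x, y] with x ≤ y that leave
-- [0, len(s)): there A raises (ValueError/TypeError/IndexError) or, through Python's
-- negative-index wraparound into the tree array, returns an accidental value.
def Pre_getMaxCharCount (s : String) (queries : List (List Int)) : Prop :=
  queries.all (pvQueryOK (PySem.Str.len s)) = true

instance (s : String) (queries : List (List Int)) : Decidable (Pre_getMaxCharCount s queries) := by
  unfold Pre_getMaxCharCount; infer_instance

def pvWitness_getMaxCharCount : String × List (List Int) := ("ab", [[0, 1], [1, 0]])

-- On queries [x,y] with 0 ≤ x ≤ y < len(s) whose lowercased characters are all below 'a'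
-- (digits, spaces, punctuation), A returns 0 because its accumulator is seeded with the
-- sentinel ['a', 0] that outranks every such character, while B returns the count of the
-- largest character of the slice — the intended answer to a maximal-character query.
def D_getMaxCharCount (s : String) (queries : List (List Int)) : Prop :=
  queries.any (fun q => q.headD 0 ≤ q.getLastD 0 &&
    ((s.toList.take (q.getLastD 0 + 1).toNat).drop (q.headD 0).toNat).all
      (fun c => PySem.Chars.lowerChar c < 'a')) = true

instance (s : String) (queries : List (List Int)) : Decidable (D_getMaxCharCount s queries) := by
  unfold D_getMaxCharCount; infer_instance

def Spec_getMaxCharCount (s : String) (queries : List (List Int)) (out : List Int) : Prop :=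
  ¬ D_getMaxCharCount s queries → out = getMaxCharCount_alt s queries

instance (s : String) (queries : List (List Int)) (out : List Int) : Decidable (Spec_getMaxCharCount s queries out) := by
  unfold Spec_getMaxCharCount; infer_instance

def pvDiffWitness_getMaxCharCount : String × List (List Int) := ("3", [[0, 0]])
def pvDiffWitnessOut_getMaxCharCount : (List Int) × (List Int) := ([0], [1])

-- ===== CLAIM (what is proved, stated in full; the proofs are below) =====
def Claim_unchanged_getMaxCharCount : Prop := ∀ (s : String) (queries : List (List Int)), Dom_getMaxCharCount s queries → Pre_getMaxCharCount s queries → Spec_getMaxCharCount s queries (getMaxCharCount s queries)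
def Claim_changed_getMaxCharCount : Prop := Dom_getMaxCharCount (pvDiffWitness_getMaxCharCount.1) (pvDiffWitness_getMaxCharCount.2) ∧ Pre_getMaxCharCount (pvDiffWitness_getMaxCharCount.1) (pvDiffWitness_getMaxCharCount.2) ∧ D_getMaxCharCount (pvDiffWitness_getMaxCharCount.1) (pvDiffWitness_getMaxCharCount.2) ∧ getMaxCharCount (pvDiffWitness_getMaxCharCount.1) (pvDiffWitness_getMaxCharCount.2) = pvDiffWitnessOut_getMaxCharCount.1 ∧ getMaxCharCount_alt (pvDiffWitness_getMaxCharCount.1) (pvDiffWitness_getMaxCharCount.2) = pvDiffWitnessOut_getMaxCharCount.2 ∧ pvDiffWitnessOut_getMaxCharCount.1 ≠ pvDiffWitnessOut_getMaxCharCount.2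
def Claim_exact_getMaxCharCount : Prop := ∀ (s : String) (queries : List (List Int)), Dom_getMaxCharCount s queries → Pre_getMaxCharCount s queries → D_getMaxCharCount s queries → getMaxCharCount s queries ≠ getMaxCharCount_alt s queries

-- ===== LEMMAS AND PROOFS =====

-- the per-query bad-range test, the same condition D_ states inline (proof-side form)
def pvBadPair (s : List Char) (x y : Int) : Bool :=
  decide (x ≤ y) &&
    ((s.drop x.toNat).take (y - x + 1).toNat).all (fun c => decide (PySem.Chars.lowerChar c < 'a'))

-- semantic value of a char list as A's accumulator sees it: the maximum seeded with the
-- sentinel 'a', and how often that maximum occurs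
def pvMaxA (cs : List Char) : Char := cs.foldl max 'a'
def pvSem (cs : List Char) : Char × Int := (pvMaxA cs, (cs.count (pvMaxA cs) : Int))
-- the floorless summary a tree node stores (a node covers a nonempty char list)
def pvMax0 (cs : List Char) : Char := cs.foldl max (Char.ofNat 0)
def pvSumm (cs : List Char) : Char × Int := (pvMax0 cs, (cs.count (pvMax0 cs) : Int))

-- leaf positions covered by tree node k (n leaves)
def pvCover (n k : Nat) : List Nat :=
  if _h : 1 ≤ k ∧ k < n then pvCover n (2 * k) ++ pvCover n (2 * k + 1) else [k - n]
termination_by 2 * n - k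
decreasing_by all_goals omega

def pvChars (lo : List Char) (n k : Nat) : List Char :=
  (pvCover n k).map (fun t => lo.getD t 'a')

def pvRangeChars (lo : List Char) (n : Nat) (i j : Int) : List Char :=
  if i ≤ j then (List.range' i.toNat (j + 1 - i).toNat).flatMap (fun k => pvChars lo n k) else []

-- the per-query value each port computes (proof-side views of the two folds)
def pvFA (s : String) (q : List Int) : Int :=
  if q.length == 2 then
    (pvQloop (pvBuild s.toList) (q.headD 0 + PySem.Str.len s) (q.getLastD 0 + PySem.Str.len s) ('a', 0)).2
  else 0

def pvFB (s : String) (q : List Int) : Int :=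
  if q.length == 2 then
    let x := q.headD 0
    let y := q.getLastD 0
    if x > y then 0
    else
      let low := PySem.Chars.lower (PySem.List.slice s.toList (some x) (some (y + 1)))
      match PySem.List.max? low (fun c => c) with
      | some mx => (low.count mx : Int)
      | none => 0
  else 0

-- D_'s inline take-then-drop window is pvBadPair's drop-then-take window (x in range or x > y)
theorem pvD_eq_badPair (s : List Char) (x y : Int) (hx : 0 ≤ x ∨ y < x) :
    (x ≤ y && ((s.take (y + 1).toNat).drop x.toNat).all
        (fun c => PySem.Chars.lowerChar c < 'a'))
      = pvBadPair s x y := by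
  by_cases hxy : x ≤ y
  · have hx0 : 0 ≤ x := by rcases hx with h | h <;> omega
    have ht : (y + 1).toNat - x.toNat = (y - x + 1).toNat := by omega
    rw [pvBadPair, List.drop_take, ht]
  · simp [pvBadPair, hxy]

theorem pv_zero_le (c : Char) : Char.ofNat 0 ≤ c := by
  simp [Char.le_def]

theorem pv_le_foldl_max (a : Char) (l : List Char) : a ≤ l.foldl max a := by
  induction l generalizing a with
  | nil => simp
  | cons hd tl ih => simpa using le_trans (le_max_left a hd) (ih (max a hd))

theorem pv_mem_le_foldl_max {c : Char} {l : List Char} (h : c ∈ l) (a : Char) :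
    c ≤ l.foldl max a := by
  induction l generalizing a with
  | nil => cases h
  | cons hd tl ih =>
    simp only [List.foldl_cons]
    rcases List.mem_cons.mp h with rfl | hm
    · exact le_trans (le_max_right a c) (pv_le_foldl_max _ tl)
    · exact ih hm (max a hd)

theorem pv_foldl_max_mem (a : Char) (l : List Char) : l.foldl max a = a ∨ l.foldl max a ∈ l := by
  induction l generalizing a with
  | nil => left; rfl
  | cons hd tl ih =>
    simp only [List.foldl_cons]
    rcases ih (max a hd) with h | h
    · rcases max_choice a hd with h2 | h2
      · left; rw [h, h2]
      · right; rw [h, h2]; exact List.mem_cons_self ..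
    · right; exact List.mem_cons_of_mem _ h

theorem pv_foldl_max_comm (a b : Char) (l : List Char) :
    l.foldl max (max a b) = max a (l.foldl max b) := by
  induction l generalizing b with
  | nil => rfl
  | cons hd tl ih =>
    simp only [List.foldl_cons]
    rw [max_assoc, ih]

theorem pv_foldl_max_base (b : Char) (l : List Char) : l.foldl max b = max b (pvMax0 l) := by
  have h : max b (Char.ofNat 0) = b := max_eq_left (pv_zero_le b)
  conv_lhs => rw [← h]
  rw [pv_foldl_max_comm]
  rfl

theorem pv_foldl_max_of_le {l : List Char} {a : Char} (h : ∀ c ∈ l, c ≤ a) :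
    l.foldl max a = a := by
  induction l with
  | nil => rfl
  | cons hd tl ih =>
    simp only [List.foldl_cons, max_eq_left (h hd (List.mem_cons_self ..))]
    exact ih fun c hc => h c (List.mem_cons_of_mem _ hc)

theorem pvMax0_mem {ds : List Char} (hds : ds ≠ []) : pvMax0 ds ∈ ds := by
  rcases pv_foldl_max_mem (Char.ofNat 0) ds with h | h
  · obtain ⟨d, hd⟩ := List.exists_mem_of_ne_nil ds hds
    have hle : d ≤ ds.foldl max (Char.ofNat 0) := pv_mem_le_foldl_max hd _
    have hd0 : d = Char.ofNat 0 := le_antisymm (by rw [← h]; exact hle) (pv_zero_le d)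
    show ds.foldl max (Char.ofNat 0) ∈ ds
    rw [h, ← hd0]; exact hd
  · exact h

theorem pvSem_nil : pvSem [] = ('a', 0) := by
  simp [pvSem, pvMaxA]

theorem pv_foldl_max_perm {l₁ l₂ : List Char} (h : l₁.Perm l₂) (a : Char) :
    l₁.foldl max a = l₂.foldl max a := by
  induction h generalizing a with
  | nil => rfl
  | cons x _ ih => simp only [List.foldl_cons]; exact ih _
  | swap x y l => simp only [List.foldl_cons]; rw [max_right_comm]
  | trans h1 h2 ih1 ih2 => exact (ih1 a).trans (ih2 a)

theorem pvSem_perm {cs ds : List Char} (h : cs.Perm ds) : pvSem cs = pvSem ds := by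
  have hm : pvMaxA cs = pvMaxA ds := pv_foldl_max_perm h 'a'
  rw [pvSem, pvSem, hm, h.count_eq]

-- merge laws: A's two-branch merge of summaries is the summary of the concatenation
theorem pvStep_sem (cs ds : List Char) (hds : ds ≠ []) :
    pvStep (pvSem cs) (pvSumm ds) = pvSem (cs ++ ds) := by
  have hM2mem : pvMax0 ds ∈ ds := pvMax0_mem hds
  have hMapp : pvMaxA (cs ++ ds) = max (pvMaxA cs) (pvMax0 ds) := by
    rw [pvMaxA, List.foldl_append, pv_foldl_max_base]; rfl
  rw [pvStep, pvSem, pvSem, pvSumm, hMapp]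
  by_cases hc : pvMax0 ds = pvMaxA cs
  · rw [if_pos hc, hc, max_self]
    simp [List.count_append]
  · rw [if_neg hc]
    rcases lt_or_gt_of_ne hc with hlt | hgt
    · have hmax : max (pvMaxA cs) (pvMax0 ds) = pvMaxA cs := max_eq_left hlt.le
      have hnot : pvMaxA cs ∉ ds := fun hmem =>
        absurd (pv_mem_le_foldl_max hmem (Char.ofNat 0)) (not_le.mpr hlt)
      rw [pvPyMax, if_neg (by simp only [not_or, not_and, not_lt]; exact ⟨hlt.le, fun h => absurd h.symm hc⟩)]
      rw [hmax]
      simp [List.count_append, List.count_eq_zero_of_not_mem hnot]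
    · have hmax : max (pvMaxA cs) (pvMax0 ds) = pvMax0 ds := max_eq_right hgt.le
      have hnot : pvMax0 ds ∉ cs := fun hmem =>
        absurd (pv_mem_le_foldl_max hmem 'a') (not_le.mpr hgt)
      rw [pvPyMax, if_pos (Or.inl hgt)]
      rw [hmax]
      simp [List.count_append, List.count_eq_zero_of_not_mem hnot]

theorem pvMerge_summ (ds es : List Char) (hds : ds ≠ []) (hes : es ≠ []) :
    (if (pvSumm ds).1 = (pvSumm es).1 then ((pvSumm ds).1, (pvSumm ds).2 + (pvSumm es).2)
     else pvPyMax (pvSumm ds) (pvSumm es)) = pvSumm (ds ++ es) := by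
  have hdmem : pvMax0 ds ∈ ds := pvMax0_mem hds
  have hemem : pvMax0 es ∈ es := pvMax0_mem hes
  have hMapp : pvMax0 (ds ++ es) = max (pvMax0 ds) (pvMax0 es) := by
    rw [pvMax0, List.foldl_append, pv_foldl_max_base]; rfl
  rw [pvSumm, pvSumm, pvSumm, hMapp]
  by_cases hc : pvMax0 ds = pvMax0 es
  · rw [if_pos hc, ← hc, max_self]
    simp [List.count_append, hc]
  · rw [if_neg hc]
    rcases lt_or_gt_of_ne hc with hlt | hgt
    · have hmax : max (pvMax0 ds) (pvMax0 es) = pvMax0 es := max_eq_right hlt.le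
      have hnot : pvMax0 es ∉ ds := fun hmem =>
        absurd (pv_mem_le_foldl_max hmem (Char.ofNat 0)) (not_le.mpr hlt)
      rw [pvPyMax, if_pos (Or.inl hlt)]
      rw [hmax]
      simp [List.count_append, List.count_eq_zero_of_not_mem hnot]
    · have hmax : max (pvMax0 ds) (pvMax0 es) = pvMax0 ds := max_eq_left hgt.le
      have hnot : pvMax0 ds ∉ es := fun hmem =>
        absurd (pv_mem_le_foldl_max hmem (Char.ofNat 0)) (not_le.mpr hgt)
      rw [pvPyMax, if_neg (by simp only [not_or, not_and, not_lt]; exact ⟨hgt.le, fun h => absurd h hc⟩)]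
      rw [hmax]
      simp [List.count_append, List.count_eq_zero_of_not_mem hnot]

-- cover facts
theorem pvCover_leaf {n k : Nat} (h : ¬(1 ≤ k ∧ k < n)) : pvCover n k = [k - n] := by
  rw [pvCover]; simp only [dif_neg h]

theorem pvCover_node {n k : Nat} (h : 1 ≤ k ∧ k < n) :
    pvCover n k = pvCover n (2 * k) ++ pvCover n (2 * k + 1) := by
  rw [pvCover]; simp only [dif_pos h]

theorem pvCover_ne_nil_fuel : ∀ (m n k : Nat), 2 * n - k ≤ m → pvCover n k ≠ [] := by
  intro m
  induction m with
  | zero =>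
    intro n k hm
    by_cases h : 1 ≤ k ∧ k < n
    · omega
    · rw [pvCover_leaf h]; simp
  | succ m ih =>
    intro n k hm
    by_cases h : 1 ≤ k ∧ k < n
    · rw [pvCover_node h]
      intro hc
      rcases List.append_eq_nil_iff.mp hc with ⟨h1, _⟩
      exact ih n (2 * k) (by omega) h1
    · rw [pvCover_leaf h]; simp

theorem pvCover_ne_nil (n k : Nat) : pvCover n k ≠ [] :=
  pvCover_ne_nil_fuel (2 * n) n k (by omega)

theorem pvChars_ne_nil (lo : List Char) (n k : Nat) : pvChars lo n k ≠ [] := by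
  rw [pvChars]
  intro h
  exact pvCover_ne_nil n k (List.map_eq_nil_iff.mp h)

theorem pvSumm_singleton (c : Char) : pvSumm [c] = (c, 1) := by
  simp [pvSumm, pvMax0, max_eq_right (pv_zero_le c)]

-- pyRange with step -1, as a mapped List.range
theorem pv_desc (n : Nat) :
    PySem.List.pyRange ((n : Int) - 1) 0 (-1)
      = (List.range (n - 1)).map (fun (k : Nat) => ((n : Int) - 1) - (k : Int)) := by
  rw [PySem.List.pyRange]
  rw [if_neg (by norm_num : ¬ ((-1 : Int) = 0)), if_neg (by norm_num : ¬ ((0 : Int) < -1))]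
  by_cases h : (0 : Int) < (n : Int) - 1
  · rw [if_pos h]
    have hc : (((n : Int) - 1 - 0 + - -1 - 1) / - -1).toNat = n - 1 := by
      simp only [neg_neg, sub_zero]
      omega
    rw [hc]
    apply List.map_congr_left
    intro k _
    ring
  · rw [if_neg h]
    have h0 : n - 1 = 0 := by omega
    rw [h0]
    simp

def pvBuildAux (s : List Char) (m : Nat) : List (Char × Int) :=
  ((List.range (s.length - m)).map (fun (k : Nat) => ((s.length : Int) - 1) - (k : Int))).foldl
    pvBuildStep (pvInitSt s)

theorem pvBuild_eq_aux (s : List Char) : pvBuild s = pvBuildAux s 1 := by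
  rw [pvBuild, pvBuildAux, pv_desc s.length]

theorem pvBuildAux_rec (s : List Char) (m : Nat) (_h1 : 1 ≤ m) (h2 : m < s.length) :
    pvBuildAux s m = pvBuildStep (pvBuildAux s (m + 1)) (m : Int) := by
  rw [pvBuildAux, pvBuildAux, show s.length - m = (s.length - (m + 1)) + 1 by omega,
      List.range_succ, List.map_append, List.foldl_append]
  simp only [List.map_cons, List.map_nil, List.foldl_cons, List.foldl_nil]
  congr 1
  omega

theorem pvInitSt_length (s : List Char) : (pvInitSt s).length = 2 * s.length := by
  simp [pvInitSt]; omega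

theorem pvInit_leaf (s : List Char) (k : Nat) (h1 : s.length ≤ k) (h2 : k < 2 * s.length) :
    PySem.List.pyGetD (pvInitSt s) (k : Int) ('a', 0)
      = ((s.map PySem.Chars.lowerChar).getD (k - s.length) 'a', 1) := by
  have hlt : k - s.length < s.length := by omega
  rw [PySem.List.pyGetD_natCast, pvInitSt, List.getD_eq_getElem?_getD,
      List.getElem?_append_right (by simpa using h1)]
  simp only [List.length_replicate]
  rw [List.getElem?_map, List.getElem?_eq_getElem hlt]
  rw [List.getD_eq_getElem?_getD, List.getElem?_map, List.getElem?_eq_getElem hlt]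
  simp

theorem pvBuildAux_inv (s : List Char) :
    ∀ c m, s.length - m = c → 1 ≤ m →
      ((pvBuildAux s m).length = 2 * s.length ∧
       ∀ k, m ≤ k → k < 2 * s.length →
         PySem.List.pyGetD (pvBuildAux s m) (k : Int) ('a', 0)
           = pvSumm (pvChars (s.map PySem.Chars.lowerChar) s.length k)) := by
  intro c
  induction c with
  | zero =>
    intro m hm h1
    have haux : pvBuildAux s m = pvInitSt s := by
      rw [pvBuildAux, show s.length - m = 0 from hm]
      rfl
    refine ⟨by rw [haux]; exact pvInitSt_length s, ?_⟩
    intro k hk1 hk2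
    rw [haux, pvInit_leaf s k (by omega) hk2, pvChars, pvCover_leaf (by omega : ¬(1 ≤ k ∧ k < s.length))]
    simp only [List.map_cons, List.map_nil]
    rw [pvSumm_singleton]
  | succ c ih =>
    intro m hm h1
    have hmn : m < s.length := by omega
    obtain ⟨ihlen, ihval⟩ := ih (m + 1) (by omega) (by omega)
    have hrec := pvBuildAux_rec s m h1 hmn
    constructor
    · rw [hrec]
      simp only [pvBuildStep]
      rw [PySem.List.length_pySetD]
      exact ihlen
    · intro k hk1 hk2
      rw [hrec]
      simp only [pvBuildStep]
      rw [PySem.List.pyGetD_pySetD_natCast _ m k _ _ (by rw [ihlen]; omega)]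
      by_cases hkm : k = m
      · subst hkm
        rw [if_pos rfl]
        have h2k : (2 : Int) * (k : Int) = ((2 * k : Nat) : Int) := by push_cast; ring
        have h2k1 : (2 : Int) * (k : Int) + 1 = ((2 * k + 1 : Nat) : Int) := by push_cast; ring
        rw [h2k1, h2k, ihval (2 * k) (by omega) (by omega), ihval (2 * k + 1) (by omega) (by omega)]
        rw [pvMerge_summ _ _ (pvChars_ne_nil _ _ _) (pvChars_ne_nil _ _ _)]
        conv_rhs => rw [pvChars, pvCover_node ⟨h1, hmn⟩, List.map_append]
        rfl
      · rw [if_neg hkm]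
        exact ihval k (by omega) hk2

theorem pvBuild_correct (s : List Char) :
    ∀ k : Nat, 1 ≤ k → k < 2 * s.length →
      PySem.List.pyGetD (pvBuild s) (k : Int) ('a', 0)
        = pvSumm (pvChars (s.map PySem.Chars.lowerChar) s.length k) := by
  intro k hk1 hk2
  rw [pvBuild_eq_aux]
  exact (pvBuildAux_inv s (s.length - 1) 1 rfl le_rfl).2 k (by omega) hk2

-- range decomposition lemmas for the query walk
theorem pvRangeChars_empty (lo : List Char) (n : Nat) {i j : Int} (h : ¬ i ≤ j) :
    pvRangeChars lo n i j = [] := by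
  rw [pvRangeChars, if_neg h]

theorem pv_range'_concat (s c : Nat) : List.range' s (c + 1) = List.range' s c ++ [s + c] := by
  induction c generalizing s with
  | zero => simp [List.range'_succ]
  | succ c ih =>
    rw [List.range'_succ, ih (s + 1), List.range'_succ]
    simp [List.cons_append]
    omega

theorem pvRangeChars_cons (lo : List Char) (n : Nat) {i j : Int} (hij : i ≤ j) (hi : 0 ≤ i) :
    pvRangeChars lo n i j = pvChars lo n i.toNat ++ pvRangeChars lo n (i + 1) j := by
  rw [pvRangeChars, if_pos hij]
  by_cases h2 : i + 1 ≤ j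
  · rw [pvRangeChars, if_pos h2]
    rw [show ((i : Int) + 1).toNat = i.toNat + 1 from by omega,
        show (j + 1 - i).toNat = (j + 1 - (i + 1)).toNat + 1 from by omega,
        List.range'_succ, List.flatMap_cons]
  · have hji : j = i := by omega
    subst hji
    rw [pvRangeChars_empty lo n (by omega), List.append_nil,
        show (j + 1 - j).toNat = 1 from by omega]
    simp [List.range'_one]

theorem pvRangeChars_snoc (lo : List Char) (n : Nat) {i j : Int} (hij : i ≤ j) (hi : 0 ≤ i) :
    pvRangeChars lo n i j = pvRangeChars lo n i (j - 1) ++ pvChars lo n j.toNat := by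
  rw [pvRangeChars, if_pos hij]
  by_cases h2 : i ≤ j - 1
  · rw [pvRangeChars, if_pos h2]
    rw [show (j + 1 - i).toNat = (j - i).toNat + 1 from by omega, pv_range'_concat,
        List.flatMap_append, show (j - 1 + 1 - i).toNat = (j - i).toNat from by omega,
        show i.toNat + (j - i).toNat = j.toNat from by omega]
    simp
  · have hji : j = i := by omega
    subst hji
    rw [pvRangeChars_empty lo n (by omega), List.nil_append,
        show (j + 1 - j).toNat = 1 from by omega]
    simp [List.range'_one]

theorem pv_flat_halve (lo : List Char) (n : Nat) :
    ∀ (c aN : Nat), 1 ≤ aN → aN + c ≤ n →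
      (List.range' (2 * aN) (2 * c)).flatMap (fun k => pvChars lo n k)
        = (List.range' aN c).flatMap (fun k => pvChars lo n k) := by
  intro c
  induction c with
  | zero => intro aN _ _; rfl
  | succ c ih =>
    intro aN h1 h2
    rw [show 2 * (c + 1) = 2 * c + 1 + 1 from by ring]
    simp only [List.range'_succ, List.flatMap_cons]
    rw [show 2 * aN + 1 + 1 = 2 * (aN + 1) from by ring, ih (aN + 1) (by omega) (by omega),
        ← List.append_assoc]
    congr 1
    conv_rhs => rw [pvChars, pvCover_node (⟨by omega, by omega⟩ : 1 ≤ aN ∧ aN < n), List.map_append]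
    rfl

theorem pvRangeChars_halve (lo : List Char) (n : Nat) (a b : Int)
    (ha : 1 ≤ a) (hb : b < 2 * (n : Int)) (haE : a % 2 = 0) (hbO : b % 2 = 1) :
    pvRangeChars lo n a b = pvRangeChars lo n (a / 2) (b / 2) := by
  by_cases hab : a ≤ b
  · rw [pvRangeChars, if_pos hab, pvRangeChars, if_pos (by omega : a / 2 ≤ b / 2)]
    rw [show a.toNat = 2 * (a / 2).toNat from by omega,
        show (b + 1 - a).toNat = 2 * ((b / 2) + 1 - (a / 2)).toNat from by omega]
    exact pv_flat_halve lo n _ _ (by omega) (by omega)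
  · rw [pvRangeChars_empty lo n hab, pvRangeChars_empty lo n (by omega)]

theorem pv_flat_leaves (lo : List Char) (n : Nat) (hn : lo.length = n) :
    ∀ (c xN : Nat), xN + c ≤ n →
      (List.range' (xN + n) c).flatMap (fun k => pvChars lo n k) = (lo.drop xN).take c := by
  intro c
  induction c with
  | zero => intro xN _; simp
  | succ c ih =>
    intro xN h
    rw [List.range'_succ]
    simp only [List.flatMap_cons]
    have hleaf : pvChars lo n (xN + n) = [lo[xN]'(by omega)] := by
      rw [pvChars, pvCover_leaf (by omega : ¬(1 ≤ xN + n ∧ xN + n < n))]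
      simp only [List.map_cons, List.map_nil]
      congr 1
      rw [show xN + n - n = xN from by omega, List.getD_eq_getElem?_getD,
          List.getElem?_eq_getElem (by omega), Option.getD_some]
    rw [hleaf, show xN + n + 1 = (xN + 1) + n from by ring, ih (xN + 1) (by omega),
        List.drop_eq_getElem_cons (by omega : xN < lo.length), List.take_succ_cons,
        List.singleton_append]

theorem pvRangeChars_leaves (lo : List Char) (n : Nat) (hn : lo.length = n)
    (x y : Int) (hx : 0 ≤ x) (hxy : x ≤ y) (hy : y < (n : Int)) :
    pvRangeChars lo n (x + (n : Int)) (y + (n : Int)) = (lo.drop x.toNat).take (y + 1 - x).toNat := by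
  rw [pvRangeChars, if_pos (by omega : x + (n : Int) ≤ y + n),
      show (x + (n : Int)).toNat = x.toNat + n from by omega,
      show ((y + (n : Int)) + 1 - (x + n)).toNat = (y + 1 - x).toNat from by omega]
  exact pv_flat_leaves lo n hn (y + 1 - x).toNat x.toNat (by omega)

-- the query walk computes the seeded summary of all leaves of [i, j]
theorem pvQloopF_sem (st : List (Char × Int)) (lo : List Char) (n : Nat)
    (hst : ∀ k : Nat, 1 ≤ k → k < 2 * n →
      PySem.List.pyGetD st (k : Int) ('a', 0) = pvSumm (pvChars lo n k)) :
    ∀ f : Nat, ∀ i j : Int, (j - i + 2).toNat ≤ f → 1 ≤ i → j < 2 * (n : Int) →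
      ∀ acc : List Char,
        pvQloopF st f i j (pvSem acc) = pvSem (acc ++ pvRangeChars lo n i j) := by
  have hread : ∀ t : Int, 1 ≤ t → t < 2 * (n : Int) →
      PySem.List.pyGetD st t ('a', 0) = pvSumm (pvChars lo n t.toNat) := by
    intro t h1 h2
    conv_lhs => rw [show t = ((t.toNat : Nat) : Int) from (Int.toNat_of_nonneg (by omega)).symm]
    exact hst t.toNat (by omega) (by omega)
  intro f
  induction f with
  | zero =>
    intro i j hf hi hj acc
    rw [show pvQloopF st 0 i j (pvSem acc) = pvSem acc from rfl,
        pvRangeChars_empty lo n (by omega), List.append_nil]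
  | succ f ih =>
    intro i j hf hi hj acc
    by_cases hij : i ≤ j
    · simp only [pvQloopF, if_pos hij,
        PySem.Int.mod_eq_emod_of_pos (by norm_num : (0:Int) < 2),
        PySem.Int.floordiv_eq_ediv_of_pos (by norm_num : (0:Int) < 2)]
      by_cases hio : i % 2 = 1 <;> by_cases hje : j % 2 = 0
      · -- both endpoints consumed
        have hilt : i + 1 ≤ j := by omega
        simp only [if_pos hio, if_pos hje]
        rw [hread i (by omega) (by omega), pvStep_sem acc _ (pvChars_ne_nil _ _ _),
            hread j (by omega) (by omega), pvStep_sem _ _ (pvChars_ne_nil _ _ _),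
            ih ((i + 1) / 2) ((j - 1) / 2) (by omega) (by omega) (by omega)]
        rw [pvRangeChars_cons lo n hij (by omega),
            pvRangeChars_snoc lo n hilt (by omega),
            pvRangeChars_halve lo n (i + 1) (j - 1) (by omega) (by omega) (by omega) (by omega)]
        apply pvSem_perm
        rw [List.append_assoc, List.append_assoc]
        exact List.Perm.append_left acc (List.Perm.append_left _ List.perm_append_comm)
      · -- only i consumed
        simp only [if_pos hio, if_neg hje]
        rw [hread i (by omega) (by omega), pvStep_sem acc _ (pvChars_ne_nil _ _ _),
            ih ((i + 1) / 2) (j / 2) (by omega) (by omega) (by omega)]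
        rw [pvRangeChars_cons lo n hij (by omega),
            pvRangeChars_halve lo n (i + 1) j (by omega) (by omega) (by omega) (by omega),
            List.append_assoc]
      · -- only j consumed
        simp only [if_neg hio, if_pos hje]
        rw [hread j (by omega) (by omega), pvStep_sem acc _ (pvChars_ne_nil _ _ _),
            ih (i / 2) ((j - 1) / 2) (by omega) (by omega) (by omega)]
        rw [pvRangeChars_snoc lo n hij (by omega),
            pvRangeChars_halve lo n i (j - 1) (by omega) (by omega) (by omega) (by omega)]
        apply pvSem_perm
        rw [List.append_assoc]
        exact List.Perm.append_left acc List.perm_append_comm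
      · -- neither consumed
        simp only [if_neg hio, if_neg hje]
        rw [ih (i / 2) (j / 2) (by omega) (by omega) (by omega),
            pvRangeChars_halve lo n i j (by omega) (by omega) (by omega) (by omega)]
    · simp only [pvQloopF, if_neg hij]
      rw [pvRangeChars_empty lo n hij, List.append_nil]

theorem pvQloop_of_gt (st : List (Char × Int)) (i j : Int) (m : Char × Int) (h : j < i) :
    pvQloop st i j m = m := by
  rw [pvQloop]
  rcases hf : (j - i + 2).toNat with _ | f
  · rfl
  · simp only [pvQloopF]; rw [if_neg (by omega)]

-- fold-to-map views of the two ports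
theorem pv_foldlA (s : String) :
    ∀ (qs : List (List Int)) (acc : List Int),
      qs.foldl (fun res q =>
        if q.length == 2 then
          res ++ [(pvQloop (pvBuild s.toList) (q.headD 0 + PySem.Str.len s) (q.getLastD 0 + PySem.Str.len s) ('a', 0)).2]
        else res ++ [0]) acc
      = acc ++ qs.map (pvFA s) := by
  intro qs
  induction qs with
  | nil => intro acc; simp
  | cons q t ih =>
    intro acc
    rw [List.foldl_cons, List.map_cons, ih]
    by_cases h : q.length == 2 <;> simp [pvFA, h]

theorem pv_foldlB (s : String) :
    ∀ (qs : List (List Int)) (acc : List Int),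
      qs.foldl (fun res q =>
        if q.length == 2 then
          let x := q.headD 0
          let y := q.getLastD 0
          res ++ [if x > y then 0
                  else
                    let low := PySem.Chars.lower (PySem.List.slice s.toList (some x) (some (y + 1)))
                    match PySem.List.max? low (fun c => c) with
                    | some mx => (low.count mx : Int)
                    | none => 0]
        else res ++ [0]) acc
      = acc ++ qs.map (pvFB s) := by
  intro qs
  induction qs with
  | nil => intro acc; simp
  | cons q t ih =>
    intro acc
    rw [List.foldl_cons, List.map_cons, ih]
    by_cases h : q.length == 2 <;> simp [pvFB, h]

theorem pvA_eq_map (s : String) (queries : List (List Int)) :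
    getMaxCharCount s queries = queries.map (pvFA s) := by
  simp only [getMaxCharCount]
  rw [pv_foldlA s queries [], List.nil_append]

theorem pvB_eq_map (s : String) (queries : List (List Int)) :
    getMaxCharCount_alt s queries = queries.map (pvFB s) := by
  simp only [getMaxCharCount_alt]
  rw [pv_foldlB s queries [], List.nil_append]

-- the lowered slice, as a drop/take of the lowered string
theorem pv_low_eq (s : String) (x y : Int) (hx : 0 ≤ x) (hxy : x ≤ y)
    (hy : y < (s.toList.length : Int)) :
    PySem.Chars.lower (PySem.List.slice s.toList (some x) (some (y + 1)))
      = ((s.toList.map PySem.Chars.lowerChar).drop x.toNat).take (y + 1 - x).toNat := by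
  rw [PySem.List.slice_of_nonneg s.toList hx (by omega) (by omega) (by omega)]
  simp only [PySem.Chars.lower]
  rw [List.map_take, List.map_drop]
  rw [show ((y : Int) + 1).toNat - x.toNat = (y + 1 - x).toNat from by omega]

theorem pvFA_eval (s : String) (x y : Int) (hx : 0 ≤ x) (hxy : x ≤ y)
    (hy : y < (s.toList.length : Int)) :
    pvFA s [x, y]
      = (pvSem (((s.toList.map PySem.Chars.lowerChar).drop x.toNat).take (y + 1 - x).toNat)).2 := by
  simp only [pvFA, List.length_cons, List.length_nil, List.headD_cons, List.getLastD_cons,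
    List.getLastD_nil, beq_self_eq_true, if_true]
  rw [PySem.Str.len_eq, pvQloop, ← pvSem_nil,
      pvQloopF_sem (pvBuild s.toList) (s.toList.map PySem.Chars.lowerChar) s.toList.length
        (pvBuild_correct s.toList) _ _ _ le_rfl (by omega) (by omega) [],
      List.nil_append,
      pvRangeChars_leaves _ _ (by simp) x y hx hxy hy]

theorem pvFB_eval (s : String) (x y : Int) (hx : 0 ≤ x) (hxy : x ≤ y)
    (hy : y < (s.toList.length : Int)) :
    pvFB s [x, y]
      = (match PySem.List.max? (((s.toList.map PySem.Chars.lowerChar).drop x.toNat).take (y + 1 - x).toNat) (fun c => c) with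
         | some mx => ((((s.toList.map PySem.Chars.lowerChar).drop x.toNat).take (y + 1 - x).toNat).count mx : Int)
         | none => 0) := by
  simp only [pvFB, List.length_cons, List.length_nil, List.headD_cons, List.getLastD_cons,
    List.getLastD_nil, beq_self_eq_true, if_true]
  rw [if_neg (by omega : ¬ x > y), pv_low_eq s x y hx hxy hy]

-- A's seeded count agrees with B's plain max-count once one char ≥ 'a' is present
theorem pvSem_snd_eq (cs : List Char) (c0 : Char) (h0 : c0 ∈ cs) (ha : 'a' ≤ c0) :
    (pvSem cs).2 = (match PySem.List.max? cs (fun c => c) with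
                    | some mx => ((cs.count mx : Nat) : Int)
                    | none => 0) := by
  cases hm : PySem.List.max? cs (fun c => c) with
  | none =>
    have hnil : cs = [] := (PySem.List.max?_eq_none_iff _ _).mp hm
    subst hnil; cases h0
  | some m =>
    have hmem := PySem.List.max?_mem hm
    have hismax := PySem.List.max?_isMax hm
    have hA : pvMaxA cs = m := by
      apply le_antisymm
      · rcases pv_foldl_max_mem 'a' cs with h | h
        · rw [pvMaxA, h]; exact le_trans ha (hismax c0 h0)
        · exact hismax _ h
      · exact pv_mem_le_foldl_max hmem 'a'
    simp only [pvSem]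
    rw [hA]

theorem pv_window_eq (s : String) (x y : Int) :
    ((s.toList.map PySem.Chars.lowerChar).drop x.toNat).take (y + 1 - x).toNat
      = ((s.toList.drop x.toNat).take (y - x + 1).toNat).map PySem.Chars.lowerChar := by
  rw [List.map_take, List.map_drop, show ((y : Int) - x + 1).toNat = (y + 1 - x).toNat from by omega]

theorem pv_query_eq (s : String) (x y : Int)
    (hok : y < x ∨ (0 ≤ x ∧ y < (s.toList.length : Int)))
    (hnb : pvBadPair s.toList x y = false) :
    pvFA s [x, y] = pvFB s [x, y] := by
  by_cases hxy : x ≤ y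
  · have hx : 0 ≤ x := by rcases hok with h | h <;> omega
    have hy : y < (s.toList.length : Int) := by rcases hok with h | h <;> omega
    rw [pvFA_eval s x y hx hxy hy, pvFB_eval s x y hx hxy hy]
    have hwit : ∃ c ∈ ((s.toList.map PySem.Chars.lowerChar).drop x.toNat).take (y + 1 - x).toNat,
        ¬ (c < 'a') := by
      simp only [pvBadPair, Bool.and_eq_false_iff, decide_eq_false_iff_not, not_le,
        List.all_eq_false] at hnb
      rcases hnb with h | h
      · omega
      · obtain ⟨r, hr, hge⟩ := h
        refine ⟨PySem.Chars.lowerChar r, ?_, by simpa using hge⟩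
        rw [pv_window_eq]
        exact List.mem_map_of_mem hr
    obtain ⟨c0, hc0, hge⟩ := hwit
    exact pvSem_snd_eq _ c0 hc0 (not_lt.mp hge)
  · simp only [pvFA, pvFB, List.length_cons, List.length_nil, List.headD_cons,
      List.getLastD_cons, List.getLastD_nil, beq_self_eq_true, if_true]
    rw [if_pos (by omega : x > y), pvQloop_of_gt _ _ _ _ (by omega)]

theorem pvSem_snd_zero (cs : List Char) (hall : ∀ c ∈ cs, c < 'a') : (pvSem cs).2 = 0 := by
  have hmax : pvMaxA cs = 'a' := pv_foldl_max_of_le fun c hc => (hall c hc).le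
  have hnot : 'a' ∉ cs := fun hmem => absurd (hall _ hmem) (lt_irrefl _)
  simp only [pvSem, hmax]
  simp [List.count_eq_zero_of_not_mem hnot]

theorem pv_maxcount_ne (cs : List Char) (hne : cs ≠ []) :
    (match PySem.List.max? cs (fun c => c) with
     | some mx => ((cs.count mx : Nat) : Int)
     | none => 0) ≠ 0 := by
  cases hm : PySem.List.max? cs (fun c => c) with
  | none => exact absurd ((PySem.List.max?_eq_none_iff _ _).mp hm) hne
  | some mx =>
    have hpos : 0 < cs.count mx := List.count_pos_iff.mpr (PySem.List.max?_mem hm)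
    show ((cs.count mx : Nat) : Int) ≠ 0
    exact_mod_cast hpos.ne'

theorem pv_below_vals (s : String) (x y : Int) (hx : 0 ≤ x) (hxy : x ≤ y)
    (hy : y < (s.toList.length : Int))
    (hall : ∀ c ∈ ((s.toList.map PySem.Chars.lowerChar).drop x.toNat).take (y + 1 - x).toNat, c < 'a') :
    pvFA s [x, y] = 0 ∧ pvFB s [x, y] ≠ 0 := by
  constructor
  · rw [pvFA_eval s x y hx hxy hy]
    exact pvSem_snd_zero _ hall
  · rw [pvFB_eval s x y hx hxy hy]
    apply pv_maxcount_ne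
    apply List.ne_nil_of_length_pos
    simp only [List.length_take, List.length_drop, List.length_map]
    omega

-- ===== VERDICT (by name: the statement is the Claim_ definition above) =====
theorem getMaxCharCount_spec : Claim_unchanged_getMaxCharCount := by
  intro s queries hdom hpre
  unfold Spec_getMaxCharCount
  intro hnd
  rw [pvA_eq_map, pvB_eq_map]
  apply List.map_congr_left
  intro q hq
  have hok : pvQueryOK (PySem.Str.len s) q = true := by
    unfold Pre_getMaxCharCount at hpre
    exact List.all_eq_true.mp hpre q hq
  rcases q with _ | ⟨x, _ | ⟨y, _ | ⟨z, r⟩⟩⟩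
  · rfl
  · rfl
  · have hok' : y < x ∨ (0 ≤ x ∧ y < (s.toList.length : Int)) := by
      simp only [pvQueryOK] at hok
      rw [PySem.Str.len_eq] at hok
      simpa using hok
    have hdq : (decide (x ≤ y) && ((s.toList.take (y + 1).toNat).drop x.toNat).all
        (fun c => PySem.Chars.lowerChar c < 'a')) = false := by
      unfold D_getMaxCharCount at hnd
      cases hb : (decide (x ≤ y) && ((s.toList.take (y + 1).toNat).drop x.toNat).all
          (fun c => PySem.Chars.lowerChar c < 'a')) with
      | false => rfl
      | true =>
        refine absurd (List.any_eq_true.mpr ⟨[x, y], hq, ?_⟩) hnd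
        simpa using hb
    apply pv_query_eq s x y hok'
    rw [← pvD_eq_badPair s.toList x y (by omega)]
    exact hdq
  · rfl

theorem getMaxCharCount_changed : Claim_changed_getMaxCharCount := by
  unfold Claim_changed_getMaxCharCount; decide

theorem getMaxCharCount_tight : Claim_exact_getMaxCharCount := by
  intro s queries hdom hpre hD heq
  rw [pvA_eq_map, pvB_eq_map] at heq
  unfold D_getMaxCharCount at hD
  obtain ⟨q0, hq0mem, hq0⟩ := List.any_eq_true.mp hD
  have hok : pvQueryOK (PySem.Str.len s) q0 = true := by
    unfold Pre_getMaxCharCount at hpre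
    exact List.all_eq_true.mp hpre q0 hq0mem
  rcases q0 with _ | ⟨x, _ | ⟨y, _ | ⟨z, r⟩⟩⟩
  · simp [pvQueryOK] at hok
  · simp [pvQueryOK] at hok
  swap
  · simp [pvQueryOK] at hok
  · have hq0' : (decide (x ≤ y) && ((s.toList.take (y + 1).toNat).drop x.toNat).all
        (fun c => PySem.Chars.lowerChar c < 'a')) = true := by
      simpa using hq0
    have hq0b : x ≤ y := by
      have h := hq0'
      simp only [Bool.and_eq_true, decide_eq_true_eq] at h
      exact h.1
    have hok' : 0 ≤ x ∧ y < (s.toList.length : Int) := by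
      simp only [pvQueryOK] at hok
      rw [PySem.Str.len_eq] at hok
      simp at hok
      rcases hok with h | h
      · omega
      · exact h
    obtain ⟨hx, hy⟩ := hok'
    have hbad' : pvBadPair s.toList x y = true := by
      rw [← pvD_eq_badPair s.toList x y (Or.inl hx)]
      exact hq0' 
    simp only [pvBadPair, Bool.and_eq_true, decide_eq_true_eq, List.all_eq_true] at hbad'
    obtain ⟨hxy, hall⟩ := hbad'
    have hall' : ∀ c ∈ ((s.toList.map PySem.Chars.lowerChar).drop x.toNat).take (y + 1 - x).toNat,
        c < 'a' := by
      intro c hc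
      rw [pv_window_eq] at hc
      obtain ⟨r0, hr0, rfl⟩ := List.mem_map.mp hc
      simpa using hall r0 hr0
    obtain ⟨hA0, hBne⟩ := pv_below_vals s x y hx hxy hy hall'
    obtain ⟨k, hk, hkq⟩ := List.getElem_of_mem hq0mem
    have hpt : pvFA s [x, y] = pvFB s [x, y] := by
      have h3 := congrArg (fun l => l[k]?) heq
      simp only [List.getElem?_map] at h3
      rw [List.getElem?_eq_getElem hk] at h3
      simp only [Option.map_some] at h3
      rw [hkq] at h3
      exact Option.some.inj h3
    rw [hA0] at hpt
    exact hBne hpt.symm
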